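-- pv_equiv track=rewrite | github.com/bekbolsunx/AIT-data | AIT data/1st_semester/PL/HW(1).py | classes_taken_by_student
-- ===== SOURCE A (Python) =====
-- def classes_taken_by_student(student_name, student_list, class_list):
--     classes = []
--     for st_id, name, year, semest, cl_id in student_list:
--         if name == student_name:
--             for c_id, clas, credit in class_list:
--                 if cl_id == c_id:
--                     classes.append(clas)
--     return classes
-- ===== SOURCE B (Python) =====
-- def classes_taken_by_student(student_name, student_list, class_list):
--     idx = {}
--     for c_id, clas, credit in class_list:
--         idx.setdefault(c_id, []).append(clas)
--     out = []
--     for st_id, name, year, semest, cl_id in student_list: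
--         if name == student_name:
--             out.extend(idx.get(cl_id, []))
--     return out
-- ===== Notes on version B (the rewrite author's own statement) =====
-- stated objective: faster
-- what changed: Builds a dict grouping class names by class id once, then a single pass over student_list extends the output by lookup, removing A's inner scan of class_list per matching student.
import Mathlib
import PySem

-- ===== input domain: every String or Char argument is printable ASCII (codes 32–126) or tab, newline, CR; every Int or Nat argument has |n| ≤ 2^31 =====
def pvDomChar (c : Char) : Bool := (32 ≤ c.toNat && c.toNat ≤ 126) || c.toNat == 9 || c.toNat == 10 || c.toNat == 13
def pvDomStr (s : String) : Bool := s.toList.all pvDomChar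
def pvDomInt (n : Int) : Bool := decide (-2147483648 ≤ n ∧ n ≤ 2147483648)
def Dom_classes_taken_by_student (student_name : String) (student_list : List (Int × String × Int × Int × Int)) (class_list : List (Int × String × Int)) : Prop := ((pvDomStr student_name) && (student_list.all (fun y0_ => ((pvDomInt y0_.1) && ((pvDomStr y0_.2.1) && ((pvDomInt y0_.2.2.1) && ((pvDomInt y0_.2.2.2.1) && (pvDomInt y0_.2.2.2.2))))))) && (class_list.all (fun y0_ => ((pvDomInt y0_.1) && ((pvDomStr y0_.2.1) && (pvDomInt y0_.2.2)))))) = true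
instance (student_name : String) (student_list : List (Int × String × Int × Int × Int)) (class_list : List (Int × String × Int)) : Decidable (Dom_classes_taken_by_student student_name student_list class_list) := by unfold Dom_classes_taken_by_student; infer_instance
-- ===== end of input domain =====

-- B replaces A's per-student rescan of class_list with a dict (class id → names) built once, then one pass over student_list (asymptotically faster; not measurable at tested sizes).


-- ===== PORT A =====
def classes_taken_by_student (student_name : String) (student_list : List (Int × String × Int × Int × Int)) (class_list : List (Int × String × Int)) : List String :=
  student_list.foldl (fun classes st =>
    if st.2.1 == student_name then
      class_list.foldl (fun classes c =>
        if st.2.2.2.2 == c.1 then classes ++ [c.2.1] else classes) classes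
    else classes) []

-- ===== PORT B =====
-- idx = {}; for c_id, clas, credit in class_list: idx.setdefault(c_id, []).append(clas)
def pvBuildIdx (class_list : List (Int × String × Int)) : PySem.Dict Int (List String) :=
  class_list.foldl (fun d c => d.insert c.1 (d.getD c.1 [] ++ [c.2.1])) PySem.Dict.empty

def classes_taken_by_student_alt (student_name : String) (student_list : List (Int × String × Int × Int × Int)) (class_list : List (Int × String × Int)) : List String :=
  let idx := pvBuildIdx class_list
  student_list.foldl (fun out st =>
    if st.2.1 == student_name then out ++ idx.getD st.2.2.2.2 [] else out) []

-- ===== PRECONDITION & SPEC =====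
def Spec_classes_taken_by_student (student_name : String) (student_list : List (Int × String × Int × Int × Int)) (class_list : List (Int × String × Int)) (out : List String) : Prop := out = classes_taken_by_student_alt student_name student_list class_list
instance (student_name : String) (student_list : List (Int × String × Int × Int × Int)) (class_list : List (Int × String × Int)) (out : List String) : Decidable (Spec_classes_taken_by_student student_name student_list class_list out) := by unfold Spec_classes_taken_by_student; infer_instance

-- ===== CLAIM (what is proved, stated in full; the proofs are below) =====
def Claim_equal_classes_taken_by_student : Prop := ∀ (student_name : String) (student_list : List (Int × String × Int × Int × Int)) (class_list : List (Int × String × Int)), Dom_classes_taken_by_student student_name student_list class_list → Spec_classes_taken_by_student student_name student_list class_list (classes_taken_by_student student_name student_list class_list)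

-- ===== LEMMAS AND PROOFS =====

-- ===== VERDICT (by name: the statement is the Claim_ definition above) =====
-- dict lookup = the names A's inner scan collects
lemma pvBuildIdx_getD (class_list : List (Int × String × Int)) (d : PySem.Dict Int (List String)) (k : Int) :
    (class_list.foldl (fun d c => d.insert c.1 (d.getD c.1 [] ++ [c.2.1])) d).getD k [] =
      class_list.foldl (fun a c => if k == c.1 then a ++ [c.2.1] else a) (d.getD k []) := by
  induction class_list generalizing d with
  | nil => rfl
  | cons c rest ih =>
    simp only [List.foldl]
    rw [ih]
    congr 1
    rw [PySem.Dict.getD_insert]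
    by_cases h : k = c.1
    · simp [h]
    · simp [h, beq_iff_eq]

lemma pv_inner_shift (class_list : List (Int × String × Int)) (k : Int) (acc : List String) :
    class_list.foldl (fun a c => if k == c.1 then a ++ [c.2.1] else a) acc =
      acc ++ class_list.foldl (fun a c => if k == c.1 then a ++ [c.2.1] else a) [] := by
  induction class_list generalizing acc with
  | nil => simp
  | cons c rest ih =>
    simp only [List.foldl]
    by_cases h : (k == c.1) = true
    · rw [if_pos h, if_pos h, ih (acc ++ [c.2.1]), List.nil_append, ih [c.2.1], List.append_assoc]
    · rw [if_neg h, if_neg h, ih acc]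

lemma pv_main (student_name : String) (student_list : List (Int × String × Int × Int × Int)) (class_list : List (Int × String × Int)) :
    classes_taken_by_student student_name student_list class_list =
      classes_taken_by_student_alt student_name student_list class_list := by
  unfold classes_taken_by_student classes_taken_by_student_alt pvBuildIdx
  induction student_list using List.reverseRecOn with
  | nil => rfl
  | append_singleton init st ih =>
    simp only [List.foldl_append, List.foldl]
    rw [← ih]
    by_cases h : (st.2.1 == student_name) = true
    · rw [if_pos h, if_pos h, pvBuildIdx_getD, pv_inner_shift]
      rfl
    · rw [if_neg h, if_neg h]

theorem classes_taken_by_student_spec : Claim_equal_classes_taken_by_student := by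
  intro student_name student_list class_list _
  exact pv_main student_name student_list class_list
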